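-- pv_equiv track=rewrite | github.com/bigb45/bikeshare-webapp-api | webapp/data_handling/bikeshare.py | get_closest_match
-- ===== SOURCE A (Python) =====
-- def get_closest_match(city):
--     city_match = {'new york city': 0, 'washington': 0, 'chicago': 0}
--     ny = 'new york city'
--     wa = 'washington'
--     chi = 'chicago'
--     for i in city:
--         if i in ny:
--             ny = ny[ny.index(i):]
--             city_match['new york city'] += 1
--         if i in wa:
--             wa = wa[wa.index(i):]
--             city_match['washington'] += 1
--         if i in chi:
--             chi = chi[chi.index(i):]
--             city_match['chicago'] += 1
--     return max(city_match, key=city_match.get)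
-- ===== SOURCE B (Python) =====
-- def _occurrence_index(name):
--     occ = {}
--     for j, ch in enumerate(name):
--         occ.setdefault(ch, []).append(j)
--     return occ
--
--
-- def _score(city, occ):
--     pos = 0
--     count = 0
--     for ch in city:
--         for p in occ.get(ch, []):
--             if p >= pos:
--                 pos = p
--                 count += 1
--                 break
--     return count
--
--
-- def get_closest_match(city):
--     best = ('new york city', _score(city, _occurrence_index('new york city')))
--     for name in ('washington', 'chicago'):
--         s = _score(city, _occurrence_index(name))
--         if s > best[1]:
--             best = (name, s)
--     return best[0]
-- ===== Notes on version B (the rewrite author's own statement) =====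
-- stated objective: alternative
-- what changed: A repeatedly truncates three name strings with substring membership tests and index() scans inside one fused loop; B precomputes for each name a char-to-positions index dict once, scores by advancing an integer pointer through that index (no string slicing or substring search), and picks the winner with a running-max accumulator instead of a dict plus max(key=get).
import Mathlib
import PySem

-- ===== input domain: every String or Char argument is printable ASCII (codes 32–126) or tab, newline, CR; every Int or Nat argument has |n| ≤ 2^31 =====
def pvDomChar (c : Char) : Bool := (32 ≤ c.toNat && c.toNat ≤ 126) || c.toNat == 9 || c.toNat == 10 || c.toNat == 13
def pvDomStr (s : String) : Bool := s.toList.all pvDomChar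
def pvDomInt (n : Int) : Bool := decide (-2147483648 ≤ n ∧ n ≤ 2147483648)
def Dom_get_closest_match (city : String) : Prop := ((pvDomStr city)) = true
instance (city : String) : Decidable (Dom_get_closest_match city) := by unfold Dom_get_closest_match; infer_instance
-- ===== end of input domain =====

-- B replaces A's repeated substring scans and string truncation by a precomputed
-- char-to-positions index per name, an integer pointer through it, and a running-max
-- selection instead of a dict plus max(key=get); same asymptotic cost, different machinery.

-- ===== PORT A =====
-- A's dict city_match has three fixed literal keys only ever bumped with +=; it is ported as
-- the three counters c1,c2,c3 carried in the loop state; max(city_match, key=city_match.get)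
-- (first key of maximal value, insertion order) is the nested if at the end.
def pvAStep (st : List Char × List Char × List Char × Int × Int × Int) (c : Char) :
    List Char × List Char × List Char × Int × Int × Int :=
  match st with
  | (ny, wa, chi, c1, c2, c3) =>
    let p := if c ∈ ny then (ny.drop (ny.idxOf c), c1 + 1) else (ny, c1)
    let q := if c ∈ wa then (wa.drop (wa.idxOf c), c2 + 1) else (wa, c2)
    let r := if c ∈ chi then (chi.drop (chi.idxOf c), c3 + 1) else (chi, c3)
    (p.1, q.1, r.1, p.2, q.2, r.2)

def get_closest_match (city : String) : String :=
  let st := city.toList.foldl pvAStep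
    ("new york city".toList, "washington".toList, "chicago".toList, (0 : Int), (0 : Int), (0 : Int))
  match st with
  | (_, _, _, c1, c2, c3) =>
    if c1 ≥ c2 ∧ c1 ≥ c3 then "new york city"
    else if c2 ≥ c3 then "washington"
    else "chicago"

-- ===== PORT B =====
-- occ.setdefault(ch, []).append(j) over enumerate(name)
def pvOcc (name : String) : PySem.Dict Char (List Int) :=
  (PySem.List.enumerate name.toList 0).foldl
    (fun d jc => d.modify jc.2 [] (· ++ [jc.1])) PySem.Dict.empty

-- the inner 'for p in occ.get(ch, []): if p >= pos: …; break' scan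
def pvFirstGE : List Int → Int → Option Int
  | [], _ => none
  | p :: ps, pos => if pos ≤ p then some p else pvFirstGE ps pos

def pvBCharStep (occ : PySem.Dict Char (List Int)) (st : Int × Int) (c : Char) : Int × Int :=
  match pvFirstGE (occ.getD c []) st.1 with
  | some p => (p, st.2 + 1)
  | none => st

def pvScoreB (city : String) (occ : PySem.Dict Char (List Int)) : Int :=
  (city.toList.foldl (pvBCharStep occ) (0, 0)).2

def pvBStep (city : String) (best : String × Int) (name : String) : String × Int :=
  let s := pvScoreB city (pvOcc name)
  if s > best.2 then (name, s) else best

def get_closest_match_alt (city : String) : String :=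
  (["washington", "chicago"].foldl (pvBStep city)
    ("new york city", pvScoreB city (pvOcc "new york city"))).1

-- ===== PRECONDITION & SPEC =====
def Spec_get_closest_match (city : String) (out : String) : Prop := out = get_closest_match_alt city
instance (city : String) (out : String) : Decidable (Spec_get_closest_match city out) := by unfold Spec_get_closest_match; infer_instance

-- ===== CLAIM (what is proved, stated in full; the proofs are below) =====
def Claim_equal_get_closest_match : Prop := ∀ (city : String), Dom_get_closest_match city → Spec_get_closest_match city (get_closest_match city)

-- ===== LEMMAS AND PROOFS =====

-- A's per-name dynamics in isolation (proof-side only)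
def pvScoreStep (st : List Char × Int) (c : Char) : List Char × Int :=
  if c ∈ st.1 then (st.1.drop (st.1.idxOf c), st.2 + 1) else st

-- A's combined fold is the triple of the independent per-name folds.
theorem pv_fold_split (l : List Char) (ny wa chi : List Char) (c1 c2 c3 : Int) :
    l.foldl pvAStep (ny, wa, chi, c1, c2, c3) =
      ((l.foldl pvScoreStep (ny, c1)).1, (l.foldl pvScoreStep (wa, c2)).1,
       (l.foldl pvScoreStep (chi, c3)).1, (l.foldl pvScoreStep (ny, c1)).2,
       (l.foldl pvScoreStep (wa, c2)).2, (l.foldl pvScoreStep (chi, c3)).2) := by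
  induction l generalizing ny wa chi c1 c2 c3 with
  | nil => rfl
  | cons c t ih =>
    simp only [List.foldl_cons, pvAStep, pvScoreStep]
    by_cases h1 : c ∈ ny <;> by_cases h2 : c ∈ wa <;> by_cases h3 : c ∈ chi <;>
      simp [h1, h2, h3, ih]

-- the list of positions of c in name, indices starting at s
def pvPosList : List Char → Int → Char → List Int
  | [], _, _ => []
  | x :: xs, s, c => if x = c then s :: pvPosList xs (s + 1) c else pvPosList xs (s + 1) c

theorem pvPosList_eq_filter (name : List Char) (s : Int) (c : Char) :
    pvPosList name s c =
      ((PySem.List.enumerate name s).filter (fun jc => jc.2 == c)).map (·.1) := by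
  induction name generalizing s with
  | nil => rfl
  | cons x xs ih =>
    simp only [PySem.List.enumerate_cons, List.filter_cons, pvPosList]
    by_cases h : x = c <;> simp [h, ih]

theorem pvOcc_getD (name : String) (c : Char) :
    (pvOcc name).getD c [] = pvPosList name.toList 0 c := by
  unfold pvOcc
  rw [show (fun (d : PySem.Dict Char (List Int)) (jc : Int × Char) =>
        d.modify jc.2 [] (· ++ [jc.1])) =
      (fun d jc => (fun (d : PySem.Dict Char (List Int)) (p : Char × Int) =>
        d.modify p.1 [] (· ++ [p.2])) d ((fun (jc : Int × Char) => (jc.2, jc.1)) jc)) from rfl,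
    ← List.foldl_map (f := fun (jc : Int × Char) => (jc.2, jc.1))
      (g := fun (d : PySem.Dict Char (List Int)) (p : Char × Int) => d.modify p.1 [] (· ++ [p.2])),
    PySem.Dict.getD_foldl_modify_append, PySem.Dict.getD_empty,
    pvPosList_eq_filter name.toList 0 c]
  simp [List.filter_map, List.map_map, Function.comp_def]

theorem pvPosList_ge (name : List Char) (s : Int) (c : Char) :
    ∀ x ∈ pvPosList name s c, s ≤ x := by
  induction name generalizing s with
  | nil => simp [pvPosList]
  | cons y ys ih =>
    intro x hx
    simp only [pvPosList] at hx
    by_cases h : y = c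
    · simp [h] at hx
      rcases hx with rfl | hx
      · omega
      · have := ih (s + 1) x hx; omega
    · simp [h] at hx
      have := ih (s + 1) x hx; omega

theorem pvPosList_nil_of_not_mem (name : List Char) (s : Int) (c : Char) (h : c ∉ name) :
    pvPosList name s c = [] := by
  induction name generalizing s with
  | nil => rfl
  | cons y ys ih =>
    simp only [List.mem_cons, not_or] at h
    simp [pvPosList, Ne.symm h.1, ih (s + 1) h.2]

theorem pvFirstGE_all_ge (l : List Int) (t b : Int) (hle : t ≤ b)
    (h : ∀ x ∈ l, b ≤ x) : pvFirstGE l t = l.head? := by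
  cases l with
  | nil => rfl
  | cons x xs =>
    have : t ≤ x := le_trans hle (h x (by simp))
    simp [pvFirstGE, this]

-- the key correspondence: first indexed occurrence ≥ s+p of c in name's position list
-- is exactly membership/index-of in the suffix name.drop p
theorem pvFirstGE_posList (name : List Char) (p : Nat) (s : Int) (c : Char) :
    pvFirstGE (pvPosList name s c) (s + p) =
      if c ∈ name.drop p then some (s + p + ((name.drop p).idxOf c : Int)) else none := by
  induction name generalizing p s with
  | nil => simp [pvPosList, pvFirstGE]
  | cons x xs ih =>
    cases p with
    | zero =>
      by_cases hx : x = c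
      · subst hx
        simp [pvPosList, pvFirstGE, List.idxOf_cons_self]
      · have hstep : pvFirstGE (pvPosList xs (s + 1) c) s =
            pvFirstGE (pvPosList xs (s + 1) c) (s + 1) := by
          rw [pvFirstGE_all_ge _ s (s + 1) (by omega) (pvPosList_ge xs (s + 1) c),
            pvFirstGE_all_ge _ (s + 1) (s + 1) le_rfl (pvPosList_ge xs (s + 1) c)]
        by_cases hc : c ∈ xs
        · have h0 := ih 0 (s + 1)
          simp only [List.drop_zero, Nat.cast_zero, add_zero] at h0
          simp only [pvPosList, hx, if_false, List.drop_zero, Nat.cast_zero, add_zero]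
          rw [hstep, h0, if_pos hc, if_pos (List.mem_cons_of_mem x hc),
            List.idxOf_cons_ne _ (by simpa using hx)]
          congr 1
          push_cast; ring
        · simp only [pvPosList, hx, if_false,
            pvPosList_nil_of_not_mem xs (s + 1) c hc, pvFirstGE, List.drop_zero]
          simp [List.mem_cons, hc, Ne.symm hx]
    | succ q =>
      have hlhs : pvFirstGE (pvPosList (x :: xs) s c) (s + (q + 1 : Nat)) =
          pvFirstGE (pvPosList xs (s + 1) c) (s + 1 + (q : Nat)) := by
        by_cases hx : x = c
        · simp only [pvPosList, hx, if_true, pvFirstGE]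
          rw [if_neg (by push_cast; omega)]
          congr 1; push_cast; ring
        · simp only [pvPosList, hx, if_false]
          congr 1; push_cast; ring
      rw [hlhs, ih q (s + 1)]
      simp only [List.drop_succ_cons]
      by_cases hc : c ∈ xs.drop q
      · rw [if_pos hc, if_pos hc]
        congr 1
        push_cast; ring
      · rw [if_neg hc, if_neg hc]

-- simulation: A's shrinking-suffix scorer from suffix name.drop p equals B's
-- pointer-through-the-index scorer from pointer p.
theorem pv_sim (name : String) (l : List Char) (p : Nat) (cnt : Int)
    (hp : p ≤ name.toList.length) :
    (l.foldl pvScoreStep (name.toList.drop p, cnt)).2 =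
      (l.foldl (pvBCharStep (pvOcc name)) ((p : Int), cnt)).2 := by
  induction l generalizing p cnt with
  | nil => rfl
  | cons c t ih =>
    simp only [List.foldl_cons, pvScoreStep, pvBCharStep, pvOcc_getD]
    have hkey := pvFirstGE_posList name.toList p 0 c
    simp only [zero_add] at hkey
    rw [hkey]
    by_cases hc : c ∈ name.toList.drop p
    · have hidx : (name.toList.drop p).idxOf c < (name.toList.drop p).length :=
        List.idxOf_lt_length_of_mem hc
      have hlen : (name.toList.drop p).length = name.toList.length - p := List.length_drop ..
      simp only [hc, if_true]
      rw [List.drop_drop]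
      have := ih (p + (name.toList.drop p).idxOf c) (cnt + 1) (by omega)
      push_cast at this
      exact this
    · simp only [hc, if_false]
      exact ih p cnt hp

-- the first-maximal-key nested if of A equals B's running-max fold, unrolled
theorem pv_sel (a b c : Int) :
    (if a ≥ b ∧ a ≥ c then "new york city"
     else if b ≥ c then "washington" else "chicago") =
    (if c > (if b > a then ("washington", b) else ("new york city", a)).2
       then ("chicago", c)
       else if b > a then ("washington", b) else ("new york city", a)).1 := by
  by_cases h1 : b > a
  · simp only [h1, if_true]
    by_cases h2 : c > b
    · rw [if_pos h2, if_neg (by omega), if_neg (by omega)]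
    · rw [if_neg h2, if_neg (by omega), if_pos (by omega)]
  · simp only [h1, if_false]
    by_cases h3 : c > a
    · rw [if_pos h3, if_neg (by omega), if_neg (by omega)]
    · rw [if_neg h3, if_pos (by omega)]

-- ===== VERDICT (by name: the statement is the Claim_ definition above) =====
theorem get_closest_match_spec : Claim_equal_get_closest_match := by
  intro city _
  show get_closest_match city = get_closest_match_alt city
  unfold get_closest_match get_closest_match_alt
  rw [pv_fold_split]
  have h1 := pv_sim "new york city" city.toList 0 0 (by simp)
  have h2 := pv_sim "washington" city.toList 0 0 (by simp)
  have h3 := pv_sim "chicago" city.toList 0 0 (by simp)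
  simp only [List.drop_zero, Nat.cast_zero] at h1 h2 h3
  simp only [List.foldl_cons, List.foldl_nil, pvBStep, pvScoreB, ← h1, ← h2, ← h3]
  exact pv_sel _ _ _
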